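-- pv_equiv track=rewrite | github.com/nicolexiaoke/558Perfume | crawler/Sephora/sephora.py | __patch_details
-- ===== SOURCE A (Python) =====
-- def __patch_details(details):
--     flag = True
--     result = {}
--     for i in details:
--         if (flag and ':' in i):
--             key = i
--             flag = False
--         elif (not flag):
--             result[key] = i
--             flag = True
--     return result
-- ===== SOURCE B (Python) =====
-- def __patch_details(details):
--     result = {}
--     it = iter(details)
--     for item in it:
--         if ':' in item:
--             try:
--                 value = next(it)
--             except StopIteration:
--                 break
--             result[item] = value
--     return result
-- ===== Notes on version B (the rewrite author's own statement) =====
-- stated objective: idiomatic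
-- what changed: Replaces A's key/flag state machine (a boolean mode flag and a carried key variable across iterations) with a single shared iterator that consumes the key and its following value in one step via next(), with StopIteration breaking on a trailing key.
import Mathlib
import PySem

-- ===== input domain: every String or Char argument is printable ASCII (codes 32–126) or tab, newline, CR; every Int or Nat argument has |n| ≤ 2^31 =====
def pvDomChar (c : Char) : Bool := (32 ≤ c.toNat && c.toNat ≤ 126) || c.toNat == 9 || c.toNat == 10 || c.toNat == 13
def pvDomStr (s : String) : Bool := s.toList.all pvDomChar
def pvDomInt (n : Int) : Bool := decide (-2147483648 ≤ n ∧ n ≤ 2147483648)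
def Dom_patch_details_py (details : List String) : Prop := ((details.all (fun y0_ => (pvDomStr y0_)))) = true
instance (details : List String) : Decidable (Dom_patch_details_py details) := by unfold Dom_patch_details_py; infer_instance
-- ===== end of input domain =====

-- B replaces A's flag/key state machine by a two-at-a-time recursion over the list (one idiomatic iterator pass in Python).

-- ===== PORT A =====
-- state = (flag, key, result) as in the Python loop; key starts as "" and is only read after it was set
def pvStepA (st : Bool × String × PySem.Dict String String) (i : String) :
    Bool × String × PySem.Dict String String :=
  if st.1 && PySem.Str.isIn ":" i then (false, i, st.2.2)
  else if !st.1 then (true, st.2.1, st.2.2.insert st.2.1 i)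
  else st

def patch_details_py (details : List String) : List (String × String) :=
  (details.foldl pvStepA (true, "", PySem.Dict.empty)).2.2.items

-- ===== PORT B =====
-- shared-iterator pass: a key with ':' consumes the next item as its value; a trailing key yields nothing
def pvAltAux : List String → PySem.Dict String String → PySem.Dict String String
  | [], d => d
  | x :: rest, d =>
    if PySem.Str.isIn ":" x then
      match rest with
      | [] => d
      | v :: rest' => pvAltAux rest' (d.insert x v)
    else pvAltAux rest d

def patch_details_py_alt (details : List String) : List (String × String) :=
  (pvAltAux details PySem.Dict.empty).items

-- ===== PRECONDITION & SPEC =====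
def Spec_patch_details_py (details : List String) (out : List (String × String)) : Prop := out = patch_details_py_alt details
instance (details : List String) (out : List (String × String)) : Decidable (Spec_patch_details_py details out) := by unfold Spec_patch_details_py; infer_instance

-- ===== CLAIM (what is proved, stated in full; the proofs are below) =====
def Claim_equal_patch_details_py : Prop := ∀ (details : List String), Dom_patch_details_py details → Spec_patch_details_py details (patch_details_py details)

-- ===== LEMMAS AND PROOFS =====
theorem pvFold_eq_alt : ∀ (l : List String) (k : String) (d : PySem.Dict String String),
    (List.foldl pvStepA (true, k, d) l).2.2 = pvAltAux l d
  | [], _, _ => rfl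
  | x :: rest, k, d => by
    by_cases h : PySem.Chars.isIn [':'] x.toList = true
    · cases rest with
      | nil => simp [pvStepA, PySem.Str.isIn, h, pvAltAux]
      | cons v r =>
        have ih := pvFold_eq_alt r x (d.insert x v)
        simp [pvStepA, PySem.Str.isIn, h, pvAltAux, ih]
    · cases rest with
      | nil => simp [pvStepA, PySem.Str.isIn, h, pvAltAux]
      | cons v r =>
        have ih := pvFold_eq_alt (v :: r) k d
        simpa [pvStepA, PySem.Str.isIn, h, pvAltAux] using ih

-- ===== VERDICT (by name: the statement is the Claim_ definition above) =====
theorem patch_details_py_spec : Claim_equal_patch_details_py := by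
  intro details _
  unfold Spec_patch_details_py patch_details_py patch_details_py_alt
  rw [pvFold_eq_alt]
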